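-- pv_equiv track=rewrite | github.com/weslr-prog/AI_Studio_Lab | runner.py | _artifact_map_from_spec
-- ===== SOURCE A (Python) =====
-- from typing import Any
--
-- def _artifact_map_from_spec(spec_payload: dict[str, Any]) -> dict[str, tuple[str, ...]]:
--     mapping: dict[str, list[str]] = {}
--     for artifact in spec_payload.get("artifacts", []):
--         owner = str(artifact.get("owner_agent", ""))
--         path = str(artifact.get("path", ""))
--         if not owner or not path:
--             continue
--         mapping.setdefault(owner, []).append(path)
--     return {key: tuple(value) for key, value in mapping.items()}
-- ===== SOURCE B (Python) =====
-- def _artifact_map_from_spec(spec_payload):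
--     pairs = [(str(a.get("owner_agent", "")), str(a.get("path", "")))
--              for a in spec_payload.get("artifacts", [])]
--     pairs = [(o, p) for (o, p) in pairs if o and p]
--     owners = dict.fromkeys(o for o, _ in pairs)
--     return {o: tuple(p for ow, p in pairs if ow == o) for o in owners}
-- ===== Notes on version B (the rewrite author's own statement) =====
-- stated objective: alternative
-- what changed: Replaced the single-pass mutable dict/setdefault accumulation with a declarative pipeline: build the filtered (owner, path) pair list, dedup owners in first-occurrence order via dict.fromkeys, then produce each owner's tuple by a comprehension over the pair list.
import Mathlib
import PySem

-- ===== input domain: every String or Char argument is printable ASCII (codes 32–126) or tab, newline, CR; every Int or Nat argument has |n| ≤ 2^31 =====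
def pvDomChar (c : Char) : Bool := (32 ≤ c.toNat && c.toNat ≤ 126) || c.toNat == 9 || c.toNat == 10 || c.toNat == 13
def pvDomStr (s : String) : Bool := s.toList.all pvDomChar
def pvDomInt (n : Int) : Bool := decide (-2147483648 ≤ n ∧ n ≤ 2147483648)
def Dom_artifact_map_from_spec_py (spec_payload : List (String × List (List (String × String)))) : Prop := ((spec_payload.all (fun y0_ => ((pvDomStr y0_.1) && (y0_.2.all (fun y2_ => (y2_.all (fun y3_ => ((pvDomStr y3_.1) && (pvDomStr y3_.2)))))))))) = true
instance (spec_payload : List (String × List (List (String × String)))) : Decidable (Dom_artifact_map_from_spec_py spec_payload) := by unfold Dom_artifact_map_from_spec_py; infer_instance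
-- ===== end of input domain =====

-- B replaces A's one-pass mutable dict accumulation by a filter / ordered-dedup / per-owner-scan pipeline (alternative decomposition, same results).

-- ===== PORT A =====
-- literal transliteration of A: a dict built by setdefault/append over the artifacts, then items re-emitted
def artifact_map_from_spec_py (spec_payload : List (String × List (List (String × String)))) : List (String × List String) :=
  let artifacts := PySem.Dict.getD (PySem.Dict.mk spec_payload) "artifacts" []
  let mapping : PySem.Dict String (List String) :=
    artifacts.foldl (fun m artifact =>
      let owner := PySem.Dict.getD (PySem.Dict.mk artifact) "owner_agent" ""
      let path := PySem.Dict.getD (PySem.Dict.mk artifact) "path" ""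
      if owner = "" ∨ path = "" then m
      else m.modify owner [] (· ++ [path])) PySem.Dict.empty
  mapping.items.map (fun kv => (kv.1, kv.2))

-- ===== PORT B =====
-- literal transliteration of Source B: pair list, filter, ordered dedup of owners, per-owner scan
def artifact_map_from_spec_py_alt (spec_payload : List (String × List (List (String × String)))) : List (String × List String) :=
  let pairs0 := (PySem.Dict.getD (PySem.Dict.mk spec_payload) "artifacts" []).map
    (fun a => (PySem.Dict.getD (PySem.Dict.mk a) "owner_agent" "",
               PySem.Dict.getD (PySem.Dict.mk a) "path" ""))
  let pairs := pairs0.filter (fun op => !(op.1 == "") && !(op.2 == ""))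
  let owners := PySem.List.dedup (pairs.map (·.1))
  owners.map (fun o => (o, (pairs.filter (fun op => op.1 == o)).map (·.2)))

-- ===== PRECONDITION & SPEC =====
-- Pre_ excludes association lists that bind a consulted dict key more than once: no Python dict maps to such a
-- list under the type convention (dict keys are unique), so no behaviour of A is specified there.
def Pre_artifact_map_from_spec_py (spec_payload : List (String × List (List (String × String)))) : Prop :=
  (spec_payload.map Prod.fst).count "artifacts" ≤ 1 ∧
  ∀ a ∈ PySem.Dict.getD (PySem.Dict.mk spec_payload) "artifacts" [],
    (a.map Prod.fst).count "owner_agent" ≤ 1 ∧ (a.map Prod.fst).count "path" ≤ 1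
instance (spec_payload : List (String × List (List (String × String)))) : Decidable (Pre_artifact_map_from_spec_py spec_payload) := by unfold Pre_artifact_map_from_spec_py; infer_instance
def pvWitness_artifact_map_from_spec_py : (List (String × List (List (String × String)))) :=
  [("artifacts", [[("owner_agent", "coder"), ("path", "src/main.py")],
                  [("owner_agent", "tester"), ("path", "tests/test_main.py")],
                  [("owner_agent", "coder"), ("path", "README.md")],
                  [("path", "orphan.txt")],
                  [("owner_agent", ""), ("path", "x")]]),
   ("version", [])]
def Spec_artifact_map_from_spec_py (spec_payload : List (String × List (List (String × String)))) (out : List (String × List String)) : Prop := out = artifact_map_from_spec_py_alt spec_payload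
instance (spec_payload : List (String × List (List (String × String)))) (out : List (String × List String)) : Decidable (Spec_artifact_map_from_spec_py spec_payload out) := by unfold Spec_artifact_map_from_spec_py; infer_instance

-- ===== CLAIM (what is proved, stated in full; the proofs are below) =====
def Claim_equal_artifact_map_from_spec_py : Prop := ∀ (spec_payload : List (String × List (List (String × String)))), Dom_artifact_map_from_spec_py spec_payload → Pre_artifact_map_from_spec_py spec_payload → Spec_artifact_map_from_spec_py spec_payload (artifact_map_from_spec_py spec_payload)

-- ===== LEMMAS AND PROOFS =====

-- A's guarded loop over artifacts is the modify-loop over B's filtered pair list.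
theorem pvFoldGuard (l : List (List (String × String))) (d : PySem.Dict String (List String)) :
    l.foldl (fun m artifact =>
      let owner := PySem.Dict.getD (PySem.Dict.mk artifact) "owner_agent" ""
      let path := PySem.Dict.getD (PySem.Dict.mk artifact) "path" ""
      if owner = "" ∨ path = "" then m
      else m.modify owner [] (· ++ [path])) d
    = ((l.map (fun a => (PySem.Dict.getD (PySem.Dict.mk a) "owner_agent" "",
               PySem.Dict.getD (PySem.Dict.mk a) "path" ""))).filter
        (fun op => !(op.1 == "") && !(op.2 == ""))).foldl
        (fun m p => m.modify p.1 [] (· ++ [p.2])) d := by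
  induction l generalizing d with
  | nil => rfl
  | cons a t ih =>
    simp only [List.foldl_cons, List.map_cons, List.filter_cons]
    by_cases ho : PySem.Dict.getD (PySem.Dict.mk a) "owner_agent" "" = ""
    · simp [ho, ih]
    · by_cases hp : PySem.Dict.getD (PySem.Dict.mk a) "path" "" = ""
      · simp [ho, hp, ih]
      · simp [ho, hp, ih]

theorem artifact_map_from_spec_py_spec_aux (spec_payload : List (String × List (List (String × String)))) :
    artifact_map_from_spec_py spec_payload = artifact_map_from_spec_py_alt spec_payload := by
  show (let artifacts := PySem.Dict.getD (PySem.Dict.mk spec_payload) "artifacts" [];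
    let mapping : PySem.Dict String (List String) :=
      artifacts.foldl (fun m artifact =>
        let owner := PySem.Dict.getD (PySem.Dict.mk artifact) "owner_agent" ""
        let path := PySem.Dict.getD (PySem.Dict.mk artifact) "path" ""
        if owner = "" ∨ path = "" then m
        else m.modify owner [] (· ++ [path])) PySem.Dict.empty;
    mapping.items.map (fun kv => (kv.1, kv.2))) = _
  simp only []
  rw [pvFoldGuard]
  unfold artifact_map_from_spec_py_alt
  simp only []
  set pairs := ((PySem.Dict.getD (PySem.Dict.mk spec_payload) "artifacts" []).map
    (fun a => (PySem.Dict.getD (PySem.Dict.mk a) "owner_agent" "",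
               PySem.Dict.getD (PySem.Dict.mk a) "path" ""))).filter
        (fun op => !(op.1 == "") && !(op.2 == "")) with hpairs
  set m := pairs.foldl (fun m p => m.modify p.1 [] (· ++ [p.2])) PySem.Dict.empty with hm
  have hkeys : m.keys = PySem.List.dedup (pairs.map (·.1)) := by
    rw [hm, PySem.Dict.keys_foldl_modify_key]
    simp [PySem.Set.update_nil_left, PySem.List.dedup_eq_ofList]
  have hnd : m.keys.Nodup := by rw [hkeys]; exact PySem.List.nodup_dedup _
  have hitems := PySem.Dict.items_eq_map_keys m hnd ([] : List String)
  have hmap : m.items.map (fun kv => (kv.1, kv.2)) = m.items := by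
    apply List.map_id''; intro kv; rfl
  rw [hmap, hitems, hkeys]
  apply List.map_congr_left
  intro o _
  have := PySem.Dict.getD_foldl_modify_append (l := pairs) (d := PySem.Dict.empty) (c := o)
  rw [hm, this]
  simp

-- ===== VERDICT (by name: the statement is the Claim_ definition above) =====
theorem artifact_map_from_spec_py_spec : Claim_equal_artifact_map_from_spec_py := by
  intro sp _ hpre
  exact artifact_map_from_spec_py_spec_aux sp
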